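-- pv_equiv track=rewrite | github.com/Lapl4ce/telegram-moderation-bot | config.example.py | get_user_title
-- ===== SOURCE A (Python) =====
-- from typing import List, Dict
--
-- USER_TITLES: Dict[int, str] = {
--     1: "Землянин",
--     5: "Исследователь",
--     10: "Путешественник",
--     15: "Первопроходец",
--     20: "Космонавт",
--     25: "Планета",
--     30: "Звезда",
--     35: "Солнечная система",
--     40: "Галактика",
--     45: "Суперкластер"
-- }
--
-- def get_user_title(level: int) -> str:
--     """Get user title based on level."""
--     title = "Землянин"
--     for req_level, level_title in USER_TITLES.items():
--         if level >= req_level: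
--             title = level_title
--         else:
--             break
--     return title
-- ===== SOURCE B (Python) =====
-- USER_TITLES = {
--     1: "Землянин",
--     5: "Исследователь",
--     10: "Путешественник",
--     15: "Первопроходец",
--     20: "Космонавт",
--     25: "Планета",
--     30: "Звезда",
--     35: "Солнечная система",
--     40: "Галактика",
--     45: "Суперкластер"
-- }
--
-- def get_user_title(level: int) -> str:
--     """Get user title based on level."""
--     candidates = [req for req in USER_TITLES if level >= req]
--     return USER_TITLES[max(candidates)] if candidates else "Землянин"
-- ===== Notes on version B (the rewrite author's own statement) =====
-- stated objective: simpler
-- what changed: Replaces the ordered incremental scan with early break by a filter-then-max selection: collect all eligible requirement levels and look up the title of the maximum, independent of dict insertion order.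
import Mathlib
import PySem

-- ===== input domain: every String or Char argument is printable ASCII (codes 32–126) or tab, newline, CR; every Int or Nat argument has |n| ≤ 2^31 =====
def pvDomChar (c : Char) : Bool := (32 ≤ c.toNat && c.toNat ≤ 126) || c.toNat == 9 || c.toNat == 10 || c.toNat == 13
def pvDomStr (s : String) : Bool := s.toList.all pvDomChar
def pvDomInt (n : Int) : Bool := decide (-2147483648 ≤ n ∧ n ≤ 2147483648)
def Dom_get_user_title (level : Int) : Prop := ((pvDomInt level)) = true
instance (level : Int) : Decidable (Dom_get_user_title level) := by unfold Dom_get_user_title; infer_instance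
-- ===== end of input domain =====

-- B replaces A's ordered scan-with-break by a filter-then-max selection over the keys; objective: simpler.

-- the module constant USER_TITLES, a dict in insertion order
def USER_TITLES : PySem.Dict Int String :=
  PySem.Dict.mk [(1, "Землянин"), (5, "Исследователь"), (10, "Путешественник"),
   (15, "Первопроходец"), (20, "Космонавт"), (25, "Планета"),
   (30, "Звезда"), (35, "Солнечная система"), (40, "Галактика"),
   (45, "Суперкластер")]

-- ===== PORT A =====
-- A's for-loop over USER_TITLES.items() with an early break, as structural recursion
def getTitleLoop (level : Int) : List (Int × String) → String → String
  | [], title => title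
  | (req, t) :: rest, title =>
      if level ≥ req then getTitleLoop level rest t else title

def get_user_title (level : Int) : String :=
  getTitleLoop level USER_TITLES.items "Землянин"

-- ===== PORT B =====
-- candidates = [req for req in USER_TITLES if level >= req];
-- USER_TITLES[max(candidates)] if candidates else "Землянин"
def get_user_title_alt (level : Int) : String :=
  let candidates := USER_TITLES.keys.filter (fun req => decide (level ≥ req))
  match PySem.List.max? candidates (fun x => x) with
  | some m => (PySem.Dict.get? USER_TITLES m).getD ""   -- key always present: m comes from the keys
  | none => "Землянин"

-- ===== PRECONDITION & SPEC =====
def Spec_get_user_title (level : Int) (out : String) : Prop := out = get_user_title_alt level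
instance (level : Int) (out : String) : Decidable (Spec_get_user_title level out) := by unfold Spec_get_user_title; infer_instance

-- ===== CLAIM (what is proved, stated in full; the proofs are below) =====
def Claim_equal_get_user_title : Prop := ∀ (level : Int), Dom_get_user_title level → Spec_get_user_title level (get_user_title level)

-- ===== LEMMAS AND PROOFS =====

-- ===== VERDICT (by name: the statement is the Claim_ definition above) =====
set_option maxHeartbeats 2000000 in
theorem get_user_title_spec : Claim_equal_get_user_title := by
  intro level _
  unfold Spec_get_user_title
  rcases lt_or_ge level 1 with h | h
  ·
    have h1 : ¬ level ≥ (1:Int) := by omega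
    have h5 : ¬ level ≥ (5:Int) := by omega
    have h10 : ¬ level ≥ (10:Int) := by omega
    have h15 : ¬ level ≥ (15:Int) := by omega
    have h20 : ¬ level ≥ (20:Int) := by omega
    have h25 : ¬ level ≥ (25:Int) := by omega
    have h30 : ¬ level ≥ (30:Int) := by omega
    have h35 : ¬ level ≥ (35:Int) := by omega
    have h40 : ¬ level ≥ (40:Int) := by omega
    have h45 : ¬ level ≥ (45:Int) := by omega
    simp_all [get_user_title, get_user_title_alt, getTitleLoop,
      PySem.Dict.keys, PySem.List.max?, USER_TITLES]
  rcases lt_or_ge level 5 with h | h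
  ·
    have h1 : level ≥ (1:Int) := by omega
    have h5 : ¬ level ≥ (5:Int) := by omega
    have h10 : ¬ level ≥ (10:Int) := by omega
    have h15 : ¬ level ≥ (15:Int) := by omega
    have h20 : ¬ level ≥ (20:Int) := by omega
    have h25 : ¬ level ≥ (25:Int) := by omega
    have h30 : ¬ level ≥ (30:Int) := by omega
    have h35 : ¬ level ≥ (35:Int) := by omega
    have h40 : ¬ level ≥ (40:Int) := by omega
    have h45 : ¬ level ≥ (45:Int) := by omega
    simp_all [get_user_title, get_user_title_alt, getTitleLoop,
      PySem.Dict.keys, PySem.List.max?, USER_TITLES, PySem.Dict.get?]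
  rcases lt_or_ge level 10 with h | h
  ·
    have h1 : level ≥ (1:Int) := by omega
    have h5 : level ≥ (5:Int) := by omega
    have h10 : ¬ level ≥ (10:Int) := by omega
    have h15 : ¬ level ≥ (15:Int) := by omega
    have h20 : ¬ level ≥ (20:Int) := by omega
    have h25 : ¬ level ≥ (25:Int) := by omega
    have h30 : ¬ level ≥ (30:Int) := by omega
    have h35 : ¬ level ≥ (35:Int) := by omega
    have h40 : ¬ level ≥ (40:Int) := by omega
    have h45 : ¬ level ≥ (45:Int) := by omega
    simp_all [get_user_title, get_user_title_alt, getTitleLoop,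
      PySem.Dict.keys, PySem.List.max?, USER_TITLES, PySem.Dict.get?]
  rcases lt_or_ge level 15 with h | h
  ·
    have h1 : level ≥ (1:Int) := by omega
    have h5 : level ≥ (5:Int) := by omega
    have h10 : level ≥ (10:Int) := by omega
    have h15 : ¬ level ≥ (15:Int) := by omega
    have h20 : ¬ level ≥ (20:Int) := by omega
    have h25 : ¬ level ≥ (25:Int) := by omega
    have h30 : ¬ level ≥ (30:Int) := by omega
    have h35 : ¬ level ≥ (35:Int) := by omega
    have h40 : ¬ level ≥ (40:Int) := by omega
    have h45 : ¬ level ≥ (45:Int) := by omega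
    simp_all [get_user_title, get_user_title_alt, getTitleLoop,
      PySem.Dict.keys, PySem.List.max?, USER_TITLES, PySem.Dict.get?]
  rcases lt_or_ge level 20 with h | h
  ·
    have h1 : level ≥ (1:Int) := by omega
    have h5 : level ≥ (5:Int) := by omega
    have h10 : level ≥ (10:Int) := by omega
    have h15 : level ≥ (15:Int) := by omega
    have h20 : ¬ level ≥ (20:Int) := by omega
    have h25 : ¬ level ≥ (25:Int) := by omega
    have h30 : ¬ level ≥ (30:Int) := by omega
    have h35 : ¬ level ≥ (35:Int) := by omega
    have h40 : ¬ level ≥ (40:Int) := by omega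
    have h45 : ¬ level ≥ (45:Int) := by omega
    simp_all [get_user_title, get_user_title_alt, getTitleLoop,
      PySem.Dict.keys, PySem.List.max?, USER_TITLES, PySem.Dict.get?]
  rcases lt_or_ge level 25 with h | h
  ·
    have h1 : level ≥ (1:Int) := by omega
    have h5 : level ≥ (5:Int) := by omega
    have h10 : level ≥ (10:Int) := by omega
    have h15 : level ≥ (15:Int) := by omega
    have h20 : level ≥ (20:Int) := by omega
    have h25 : ¬ level ≥ (25:Int) := by omega
    have h30 : ¬ level ≥ (30:Int) := by omega
    have h35 : ¬ level ≥ (35:Int) := by omega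
    have h40 : ¬ level ≥ (40:Int) := by omega
    have h45 : ¬ level ≥ (45:Int) := by omega
    simp_all [get_user_title, get_user_title_alt, getTitleLoop,
      PySem.Dict.keys, PySem.List.max?, USER_TITLES, PySem.Dict.get?]
  rcases lt_or_ge level 30 with h | h
  ·
    have h1 : level ≥ (1:Int) := by omega
    have h5 : level ≥ (5:Int) := by omega
    have h10 : level ≥ (10:Int) := by omega
    have h15 : level ≥ (15:Int) := by omega
    have h20 : level ≥ (20:Int) := by omega
    have h25 : level ≥ (25:Int) := by omega
    have h30 : ¬ level ≥ (30:Int) := by omega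
    have h35 : ¬ level ≥ (35:Int) := by omega
    have h40 : ¬ level ≥ (40:Int) := by omega
    have h45 : ¬ level ≥ (45:Int) := by omega
    simp_all [get_user_title, get_user_title_alt, getTitleLoop,
      PySem.Dict.keys, PySem.List.max?, USER_TITLES, PySem.Dict.get?]
  rcases lt_or_ge level 35 with h | h
  ·
    have h1 : level ≥ (1:Int) := by omega
    have h5 : level ≥ (5:Int) := by omega
    have h10 : level ≥ (10:Int) := by omega
    have h15 : level ≥ (15:Int) := by omega
    have h20 : level ≥ (20:Int) := by omega
    have h25 : level ≥ (25:Int) := by omega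
    have h30 : level ≥ (30:Int) := by omega
    have h35 : ¬ level ≥ (35:Int) := by omega
    have h40 : ¬ level ≥ (40:Int) := by omega
    have h45 : ¬ level ≥ (45:Int) := by omega
    simp_all [get_user_title, get_user_title_alt, getTitleLoop,
      PySem.Dict.keys, PySem.List.max?, USER_TITLES, PySem.Dict.get?]
  rcases lt_or_ge level 40 with h | h
  ·
    have h1 : level ≥ (1:Int) := by omega
    have h5 : level ≥ (5:Int) := by omega
    have h10 : level ≥ (10:Int) := by omega
    have h15 : level ≥ (15:Int) := by omega
    have h20 : level ≥ (20:Int) := by omega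
    have h25 : level ≥ (25:Int) := by omega
    have h30 : level ≥ (30:Int) := by omega
    have h35 : level ≥ (35:Int) := by omega
    have h40 : ¬ level ≥ (40:Int) := by omega
    have h45 : ¬ level ≥ (45:Int) := by omega
    simp_all [get_user_title, get_user_title_alt, getTitleLoop,
      PySem.Dict.keys, PySem.List.max?, USER_TITLES, PySem.Dict.get?]
  rcases lt_or_ge level 45 with h | h
  ·
    have h1 : level ≥ (1:Int) := by omega
    have h5 : level ≥ (5:Int) := by omega
    have h10 : level ≥ (10:Int) := by omega
    have h15 : level ≥ (15:Int) := by omega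
    have h20 : level ≥ (20:Int) := by omega
    have h25 : level ≥ (25:Int) := by omega
    have h30 : level ≥ (30:Int) := by omega
    have h35 : level ≥ (35:Int) := by omega
    have h40 : level ≥ (40:Int) := by omega
    have h45 : ¬ level ≥ (45:Int) := by omega
    simp_all [get_user_title, get_user_title_alt, getTitleLoop,
      PySem.Dict.keys, PySem.List.max?, USER_TITLES, PySem.Dict.get?]
  have h1 : level ≥ (1:Int) := by omega
  have h5 : level ≥ (5:Int) := by omega
  have h10 : level ≥ (10:Int) := by omega
  have h15 : level ≥ (15:Int) := by omega
  have h20 : level ≥ (20:Int) := by omega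
  have h25 : level ≥ (25:Int) := by omega
  have h30 : level ≥ (30:Int) := by omega
  have h35 : level ≥ (35:Int) := by omega
  have h40 : level ≥ (40:Int) := by omega
  have h45 : level ≥ (45:Int) := by omega
  simp_all [get_user_title, get_user_title_alt, getTitleLoop,
    PySem.Dict.keys, PySem.List.max?, USER_TITLES, PySem.Dict.get?]
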